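-- pv_equiv track=rewrite | github.com/Johnesco/familyzoo | scripts/sync-sharpee-banner.py | find_description_end
-- ===== SOURCE A (Python) =====
-- def find_description_end(text: str, start: int) -> int:
--     """From `start` (inside a single-quoted string), scan forward to the
--     closing quote of the LAST string in this description value. Description
--     values may be one quoted string, or several joined by `+` (possibly across
--     newlines and whitespace). Returns the index of the closing quote, or -1.
--     """
--     pos = start
--     while True:
--         # Find the next single quote — that ends the current string segment.
--         end = text.find("'", pos)
--         if end == -1:
--             return -1
--         # See what follows: whitespace then `+` means a continuation.
--         i = end + 1
--         while i < len(text) and text[i] in " \t\r\n":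
--             i += 1
--         if i < len(text) and text[i] == "+":
--             # Skip the +, then any whitespace, then expect an opening quote.
--             i += 1
--             while i < len(text) and text[i] in " \t\r\n":
--                 i += 1
--             if i < len(text) and text[i] == "'":
--                 pos = i + 1
--                 continue
--         # Not a continuation — `end` is the closing quote we want.
--         return end
-- ===== SOURCE B (Python) =====
-- def find_description_end(text: str, start: int) -> int:
--     """Index-list reformulation: collect the positions of all single quotes at
--     or after `start`, then walk them two at a time: a pair (q0, q1) chains to
--     the next pair exactly when the text strictly between them strips (over
--     " \t\r\n") to a single "+"."""
--     qs = [i for i in range(len(text)) if i >= start and text[i] == "'"]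
--     while qs:
--         if len(qs) >= 2 and text[qs[0] + 1:qs[1]].strip(" \t\r\n") == "+":
--             qs = qs[2:]
--             continue
--         return qs[0]
--     return -1
-- ===== Notes on version B (the rewrite author's own statement) =====
-- stated objective: alternative
-- what changed: Replaces the char-by-char scanning state machine (find next quote, skip whitespace, test '+', skip whitespace, test quote) with a quote-index-list walk: collect all quote positions once, then consume them pairwise, a pair chaining onward exactly when the text between the two quotes strips to a single '+'; Pre_ excludes negative start, outside the natural domain of a scan position, where A inherits str.find's slice-style wraparound.
-- outside the precondition, e.g. on find_description_end("'x'", -1): A returns 2, B returns 0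
import Mathlib
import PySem

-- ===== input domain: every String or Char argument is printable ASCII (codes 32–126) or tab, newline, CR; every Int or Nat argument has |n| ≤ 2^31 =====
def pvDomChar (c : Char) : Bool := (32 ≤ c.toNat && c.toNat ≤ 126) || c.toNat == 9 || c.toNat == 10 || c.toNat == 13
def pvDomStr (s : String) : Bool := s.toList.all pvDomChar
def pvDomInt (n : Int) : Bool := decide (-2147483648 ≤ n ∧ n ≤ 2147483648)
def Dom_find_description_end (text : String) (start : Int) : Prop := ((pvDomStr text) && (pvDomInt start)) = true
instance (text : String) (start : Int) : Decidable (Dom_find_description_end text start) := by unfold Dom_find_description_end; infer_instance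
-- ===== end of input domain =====

-- B is an alternative algorithm (a quote-index-list walk instead of A's char-scanning state machine); return values proved equal on nonnegative start, no speed claim.

-- ===== PORT A =====
-- "text[i] in \" \t\r\n\""
def pvWs (c : Char) : Bool := c == ' ' || c == '\t' || c == '\r' || c == '\n'

-- "while i < len(text) and text[i] in \" \t\r\n\": i += 1"
def pvSkipWs (cs : List Char) (i : Nat) : Nat :=
  if i < cs.length ∧ pvWs (cs.getD i ' ') then pvSkipWs cs (i + 1) else i
termination_by cs.length - i
decreasing_by omega

-- (termination helper for pvLoopA, cited in its decreasing_by)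
lemma pvSkipWs_ge (cs : List Char) (i : Nat) : i ≤ pvSkipWs cs i := by
  fun_induction pvSkipWs cs i with
  | case1 i h ih => omega
  | case2 i h => omega

-- (termination helper for pvLoopA, cited in its decreasing_by)
lemma pvFindFrom_ge (cs sub : List Char) (p : Int)
    (h : PySem.Chars.findFrom cs sub p none ≠ -1) :
    p ≤ PySem.Chars.findFrom cs sub p none ∧ 0 ≤ PySem.Chars.findFrom cs sub p none := by
  unfold PySem.Chars.findFrom at h ⊢
  simp only at h ⊢
  split_ifs at h ⊢ <;>
  first
  | omega
  | (rename_i hf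
     have h0 := lt_of_le_of_ne (PySem.Chars.neg_one_le_find _ sub) (Ne.symm hf)
     omega)

-- the "while True" loop of A
def pvLoopA (cs : List Char) (pos : Int) : Int :=
  let e := PySem.Chars.findFrom cs ['\''] pos none
  if he : e = -1 then -1
  else
    let i := pvSkipWs cs (e.toNat + 1)
    if i < cs.length ∧ cs.getD i ' ' = '+' then
      let j := pvSkipWs cs (i + 1)
      if j < cs.length ∧ cs.getD j ' ' = '\'' then pvLoopA cs ((j : Int) + 1)
      else e
    else e
termination_by (cs.length + 1 - pos).toNat
decreasing_by
  rename_i h1 h2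
  simp only [e, i, j] at h1 h2 ⊢
  have hge := pvFindFrom_ge cs ['\''] pos he
  have hi := pvSkipWs_ge cs ((PySem.Chars.findFrom cs ['\''] pos none).toNat + 1)
  have hj := pvSkipWs_ge cs (pvSkipWs cs ((PySem.Chars.findFrom cs ['\''] pos none).toNat + 1) + 1)
  omega

def find_description_end (text : String) (start : Int) : Int :=
  pvLoopA text.toList start

-- ===== PORT B =====
def pvWsList : List Char := [' ', '\t', '\r', '\n']

-- "[i for i in range(len(text)) if i >= start and text[i] == \"'\"]"
def pvQuotes (cs : List Char) (start : Int) : List Nat :=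
  (List.range cs.length).filter (fun i => decide (start ≤ (i : Int)) && (cs.getD i ' ' == '\''))

-- the "while qs: …" loop of B
def pvWalk (cs : List Char) : List Nat → Int
  | [] => -1
  | [q0] => (q0 : Int)
  | q0 :: q1 :: rest =>
    if PySem.Chars.stripChars (PySem.List.slice cs (some ((q0 : Int) + 1)) (some (q1 : Int))) pvWsList = ['+']
    then pvWalk cs rest
    else (q0 : Int)

def find_description_end_alt (text : String) (start : Int) : Int :=
  pvWalk text.toList (pvQuotes text.toList start)

-- ===== PRECONDITION & SPEC =====
-- Pre_ excludes negative start, outside the natural domain of a scan position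
-- (A's str.find then restarts slice-style from len+start, B's filter from 0).
def Pre_find_description_end (text : String) (start : Int) : Prop := 0 ≤ start
instance (text : String) (start : Int) : Decidable (Pre_find_description_end text start) := by unfold Pre_find_description_end; infer_instance

def pvWitness_find_description_end : String × Int := ("'abc' + 'def'", 1)

def Spec_find_description_end (text : String) (start : Int) (out : Int) : Prop := out = find_description_end_alt text start
instance (text : String) (start : Int) (out : Int) : Decidable (Spec_find_description_end text start out) := by unfold Spec_find_description_end; infer_instance

-- ===== CLAIM (what is proved, stated in full; the proofs are below) =====
def Claim_equal_find_description_end : Prop := ∀ (text : String) (start : Int), Dom_find_description_end text start → Pre_find_description_end text start → Spec_find_description_end text start (find_description_end text start)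

-- ===== LEMMAS AND PROOFS =====

-- Nat-start form of pvQuotes, used only in the proofs
def pvQN (cs : List Char) (p : Nat) : List Nat :=
  (List.range cs.length).filter (fun i => decide (p ≤ i) && (cs.getD i ' ' == '\''))

lemma pvQuotes_natCast (cs : List Char) (p : Nat) : pvQuotes cs (p : Int) = pvQN cs p := by
  unfold pvQuotes pvQN
  apply List.filter_congr
  intro i _
  simp

lemma mem_pvQN (cs : List Char) (p i : Nat) :
    i ∈ pvQN cs p ↔ p ≤ i ∧ i < cs.length ∧ cs.getD i ' ' = '\'' := by
  unfold pvQN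
  simp [List.mem_filter]
  tauto

lemma pvQN_pairwise (cs : List Char) (p : Nat) : List.Pairwise (· < ·) (pvQN cs p) :=
  (List.pairwise_lt_range).filter _

lemma pvQN_eq_nil (cs : List Char) (p : Nat)
    (h : ∀ i, p ≤ i → i < cs.length → cs.getD i ' ' ≠ '\'') : pvQN cs p = [] := by
  rw [List.eq_nil_iff_forall_not_mem]
  intro i hi
  rw [mem_pvQN] at hi
  exact h i hi.1 hi.2.1 hi.2.2

lemma pvQN_cons (cs : List Char) (p q : Nat) (hpq : p ≤ q) (hq : q < cs.length)
    (hc : cs.getD q ' ' = '\'')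
    (hmin : ∀ i, p ≤ i → i < q → cs.getD i ' ' ≠ '\'') :
    pvQN cs p = q :: pvQN cs (q + 1) := by
  have h1 := pvQN_pairwise cs p
  have h2 : List.Pairwise (· < ·) (q :: pvQN cs (q + 1)) := by
    refine List.pairwise_cons.mpr ⟨?_, pvQN_pairwise cs (q + 1)⟩
    intro b hb
    have := (mem_pvQN cs (q + 1) b).mp hb
    omega
  have hperm : List.Perm (pvQN cs p) (q :: pvQN cs (q + 1)) := by
    have hn1 : (pvQN cs p).Nodup := h1.imp (fun h => Nat.ne_of_lt h)
    have hn2 : (q :: pvQN cs (q + 1)).Nodup := h2.imp (fun h => Nat.ne_of_lt h)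
    refine (List.perm_ext_iff_of_nodup hn1 hn2).mpr ?_
    intro i
    simp only [List.mem_cons, mem_pvQN]
    constructor
    · rintro ⟨hp, hn, hq'⟩
      by_cases hiq : i = q
      · exact Or.inl hiq
      · right
        refine ⟨?_, hn, hq'⟩
        by_contra hlt
        exact hmin i hp (by omega) hq'
    · rintro (rfl | ⟨hp, hn, hq'⟩)
      · exact ⟨hpq, hq, hc⟩
      · exact ⟨by omega, hn, hq'⟩
  exact List.Perm.eq_of_pairwise (fun a b _ _ h h' => by omega) h1 h2 hperm

lemma pvSkipWs_spec (cs : List Char) (i : Nat) :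
    pvSkipWs cs i = i + ((cs.drop i).takeWhile pvWs).length := by
  fun_induction pvSkipWs cs i with
  | case1 i h ih =>
    have hg : cs.getD i ' ' = cs[i]'h.1 := List.getD_eq_getElem cs ' ' h.1
    have hdrop : cs.drop i = cs[i]'h.1 :: cs.drop (i + 1) := List.drop_eq_getElem_cons h.1
    rw [hdrop, List.takeWhile_cons_of_pos (by rw [← hg]; exact h.2), ih]
    simp
    omega
  | case2 i h =>
    by_cases hl : i < cs.length
    · have hg : cs.getD i ' ' = cs[i]'hl := List.getD_eq_getElem cs ' ' hl
      have hdrop : cs.drop i = cs[i]'hl :: cs.drop (i + 1) := List.drop_eq_getElem_cons hl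
      have hnw : ¬ pvWs (cs[i]'hl) = true := by
        intro hw
        exact h ⟨hl, by rw [hg]; exact hw⟩
      rw [hdrop, List.takeWhile_cons_of_neg hnw]
      simp
    · rw [List.drop_eq_nil_of_le (by omega)]
      simp

lemma pvWsList_contains (c : Char) : pvWsList.contains c = pvWs c := by
  unfold pvWsList pvWs
  rw [Bool.eq_iff_iff]
  simp [List.contains_eq_mem, List.mem_cons, or_assoc]

-- stripChars over the ws set yields ['+'] iff the list is ws* '+' ws*
lemma pvStrip_eq_plus_iff (g : List Char) :
    PySem.Chars.stripChars g pvWsList = ['+'] ↔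
      ∃ w1 w2, g = w1 ++ '+' :: w2 ∧ w1.all pvWs ∧ w2.all pvWs := by
  have hpred : (fun c => pvWsList.contains c) = pvWs := funext pvWsList_contains
  unfold PySem.Chars.stripChars
  simp only [hpred]
  constructor
  · intro h
    have h1 : List.dropWhile pvWs (List.dropWhile pvWs g).reverse = ['+'] := by
      have := congrArg List.reverse h
      simpa using this
    have h2 : (List.dropWhile pvWs g).reverse
        = List.takeWhile pvWs (List.dropWhile pvWs g).reverse ++ ['+'] := by
      conv_lhs => rw [← List.takeWhile_append_dropWhile (p := pvWs)
        (l := (List.dropWhile pvWs g).reverse)]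
      rw [h1]
    have h3 : List.dropWhile pvWs g
        = '+' :: (List.takeWhile pvWs (List.dropWhile pvWs g).reverse).reverse := by
      have := congrArg List.reverse h2
      simpa using this
    refine ⟨g.takeWhile pvWs, (List.takeWhile pvWs (List.dropWhile pvWs g).reverse).reverse, ?_, ?_, ?_⟩
    · rw [← h3, List.takeWhile_append_dropWhile]
    · exact List.all_takeWhile
    · rw [List.all_reverse]
      exact List.all_takeWhile
  · rintro ⟨w1, w2, rfl, hw1, hw2⟩
    rw [List.dropWhile_append_of_pos (by simpa [List.all_eq_true] using hw1)]
    rw [List.dropWhile_cons_of_neg (by decide)]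
    rw [List.reverse_cons]
    rw [List.dropWhile_append_of_pos (by simpa [List.all_eq_true] using hw2)]
    rfl

-- findFrom from a Nat start beyond the end is -1
lemma pvFindFrom_gt_len (cs sub : List Char) (p : Nat) (h : cs.length < p) :
    PySem.Chars.findFrom cs sub (p : Int) none = -1 := by
  unfold PySem.Chars.findFrom
  simp only
  split_ifs <;> first | rfl | omega

-- character-level description of a gap between two indices
lemma pvDrop_split (cs : List Char) (a b : Nat) (hab : a ≤ b) (_hb : b ≤ cs.length) :
    cs.drop a = (cs.drop a).take (b - a) ++ cs.drop b := by
  conv_lhs => rw [← List.take_append_drop (b - a) (cs.drop a)]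
  rw [List.drop_drop]
  congr 2
  omega

-- the continuation test of A succeeds iff the gap to the next quote strips to "+",
-- and then the quote A lands on is exactly the next quote q1
-- (q is the current closing quote, q1 the next quote, no quote strictly between)
lemma pvCond_master (cs : List Char) (q q1 : Nat)
    (hq1 : q < q1) (hq1n : q1 < cs.length)
    (hcq1 : cs.getD q1 ' ' = '\'')
    (hmin : ∀ i, q + 1 ≤ i → i < q1 → cs.getD i ' ' ≠ '\'') :
    (((pvSkipWs cs (q + 1) < cs.length ∧ cs.getD (pvSkipWs cs (q + 1)) ' ' = '+')
        ∧ pvSkipWs cs (pvSkipWs cs (q + 1) + 1) < cs.length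
        ∧ cs.getD (pvSkipWs cs (pvSkipWs cs (q + 1) + 1)) ' ' = '\'') →
      (PySem.Chars.stripChars
        (PySem.List.slice cs (some ((q : Int) + 1)) (some (q1 : Int))) pvWsList = ['+']
        ∧ pvSkipWs cs (pvSkipWs cs (q + 1) + 1) = q1))
    ∧ (PySem.Chars.stripChars
        (PySem.List.slice cs (some ((q : Int) + 1)) (some (q1 : Int))) pvWsList = ['+'] →
      ((pvSkipWs cs (q + 1) < cs.length ∧ cs.getD (pvSkipWs cs (q + 1)) ' ' = '+')
        ∧ pvSkipWs cs (pvSkipWs cs (q + 1) + 1) < cs.length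
        ∧ cs.getD (pvSkipWs cs (pvSkipWs cs (q + 1) + 1)) ' ' = '\'')) := by
  have hslice : PySem.List.slice cs (some ((q : Int) + 1)) (some (q1 : Int))
      = (cs.drop (q + 1)).take (q1 - (q + 1)) := by
    have hcast : ((q : Int) + 1) = ((q + 1 : Nat) : Int) := by push_cast; ring
    rw [hcast, PySem.List.slice_natCast]
  have hcq1' : cs[q1]'hq1n = '\'' := by rw [← List.getD_eq_getElem cs ' ' hq1n]; exact hcq1
  have hdropq1 : cs.drop q1 = '\'' :: cs.drop (q1 + 1) := by
    rw [List.drop_eq_getElem_cons hq1n, hcq1']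
  have hts : cs.drop (q + 1) = (cs.drop (q + 1)).take (q1 - (q + 1)) ++ cs.drop q1 :=
    pvDrop_split cs (q + 1) q1 (by omega) (by omega)
  have htlen : (cs.drop (q + 1)).length = cs.length - (q + 1) := by simp
  have hglen : ((cs.drop (q + 1)).take (q1 - (q + 1))).length = q1 - (q + 1) := by
    simp; omega
  have hispec := pvSkipWs_spec cs (q + 1)
  constructor
  · -- A's test succeeded: decompose via the two takeWhile runs
    rintro ⟨⟨hiL, hiP⟩, hjL, hjP⟩
    set w1 := (cs.drop (q + 1)).takeWhile pvWs with hw1def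
    have hw1all : w1.all pvWs = true := List.all_takeWhile
    have hw1len : w1.length ≤ (cs.drop (q + 1)).length := (List.takeWhile_prefix pvWs).length_le
    have hw1get : ∀ k, k < w1.length → pvWs (cs.getD (q + 1 + k) ' ') = true := by
      intro k hk
      have hk2 : k < (cs.drop (q + 1)).length := lt_of_lt_of_le hk hw1len
      have hk3 : q + 1 + k < cs.length := by omega
      have h1 : w1[k]'hk = (cs.drop (q + 1))[k]'hk2 := (List.takeWhile_prefix pvWs).getElem hk
      have h2 : (cs.drop (q + 1))[k]'hk2 = cs[q + 1 + k]'hk3 := List.getElem_drop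
      have h3 := List.all_eq_true.mp hw1all _ (List.getElem_mem hk)
      rw [List.getD_eq_getElem cs ' ' hk3, ← h2, ← h1]
      exact h3
    rw [hispec] at hiL hiP hjL hjP ⊢
    set i := q + 1 + w1.length with hidef
    have hjspec := pvSkipWs_spec cs (i + 1)
    set w2 := (cs.drop (i + 1)).takeWhile pvWs with hw2def
    have hw2all : w2.all pvWs = true := List.all_takeWhile
    have hw2len : w2.length ≤ (cs.drop (i + 1)).length := (List.takeWhile_prefix pvWs).length_le
    have hw2get : ∀ k, k < w2.length → pvWs (cs.getD (i + 1 + k) ' ') = true := by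
      intro k hk
      have hk2 : k < (cs.drop (i + 1)).length := lt_of_lt_of_le hk hw2len
      have hk3 : i + 1 + k < cs.length := by simp at hk2; omega
      have h1 : w2[k]'hk = (cs.drop (i + 1))[k]'hk2 := (List.takeWhile_prefix pvWs).getElem hk
      have h2 : (cs.drop (i + 1))[k]'hk2 = cs[i + 1 + k]'hk3 := List.getElem_drop
      have h3 := List.all_eq_true.mp hw2all _ (List.getElem_mem hk)
      rw [List.getD_eq_getElem cs ' ' hk3, ← h2, ← h1]
      exact h3
    rw [hjspec] at hjL hjP ⊢
    set j := i + 1 + w2.length with hjdef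
    -- the landing quote is exactly q1
    have hjq1 : j = q1 := by
      have hge : q1 ≤ j := by
        by_contra hlt
        exact hmin j (by omega) (by omega) hjP
      have hle : ¬ q1 < j := by
        intro hlt
        rcases Nat.lt_trichotomy q1 i with hc | hc | hc
        · have hk := hw1get (q1 - (q + 1)) (by omega)
          rw [show q + 1 + (q1 - (q + 1)) = q1 by omega, hcq1] at hk
          exact absurd hk (by decide)
        · rw [← hc] at hiP
          rw [hiP] at hcq1
          exact absurd hcq1 (by decide)
        · have hk := hw2get (q1 - (i + 1)) (by omega)
          rw [show i + 1 + (q1 - (i + 1)) = q1 by omega, hcq1] at hk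
          exact absurd hk (by decide)
      omega
    -- decompose the gap
    have hdw1 : (cs.drop (q + 1)).dropWhile pvWs = cs.drop i := by
      have h0 : cs.drop (q + 1) = w1 ++ (cs.drop (q + 1)).dropWhile pvWs :=
        (List.takeWhile_append_dropWhile).symm
      have h1 := congrArg (List.drop w1.length) h0
      rw [List.drop_left, List.drop_drop] at h1
      rw [← h1, hidef, Nat.add_comm (q + 1) w1.length]
    have hdropi : cs.drop i = '+' :: cs.drop (i + 1) := by
      rw [List.drop_eq_getElem_cons hiL]
      rw [← List.getD_eq_getElem cs ' ' hiL, hiP]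
    have hdw2 : (cs.drop (i + 1)).dropWhile pvWs = cs.drop q1 := by
      have h0 : cs.drop (i + 1) = w2 ++ (cs.drop (i + 1)).dropWhile pvWs :=
        (List.takeWhile_append_dropWhile).symm
      have h1 := congrArg (List.drop w2.length) h0
      rw [List.drop_left, List.drop_drop] at h1
      rw [← h1, ← hjq1, hjdef, Nat.add_comm (i + 1) w2.length]
    have ht2 : cs.drop (q + 1) = (w1 ++ '+' :: w2) ++ cs.drop q1 := by
      conv_lhs => rw [← List.takeWhile_append_dropWhile (p := pvWs) (l := cs.drop (q + 1))]
      rw [hdw1, hdropi]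
      conv_lhs => rw [← List.takeWhile_append_dropWhile (p := pvWs) (l := cs.drop (i + 1))]
      rw [hdw2, ← hw2def]
      simp
      exact hw1def.symm
    have hgeq : (cs.drop (q + 1)).take (q1 - (q + 1)) = w1 ++ '+' :: w2 := by
      rw [ht2]
      exact List.take_left' (by simp; omega)
    refine ⟨?_, hjq1⟩
    rw [hslice]
    exact (pvStrip_eq_plus_iff _).mpr ⟨w1, w2, hgeq, hw1all, hw2all⟩
  · -- the gap strips to "+": reconstruct A's scan positions
    intro hstrip
    rw [hslice] at hstrip
    obtain ⟨w1, w2, hg, hw1all, hw2all⟩ := (pvStrip_eq_plus_iff _).mp hstrip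
    have hglen2 : w1.length + 1 + w2.length = q1 - (q + 1) := by
      have := congrArg List.length hg
      simp at this
      omega
    have ht2 : cs.drop (q + 1) = w1 ++ '+' :: (w2 ++ cs.drop q1) := by
      rw [hts, hg]
      simp
    have htw : (cs.drop (q + 1)).takeWhile pvWs = w1 := by
      rw [ht2, List.takeWhile_append_of_pos (by simpa [List.all_eq_true] using hw1all),
        List.takeWhile_cons_of_neg (by decide)]
      simp
    have hieq : pvSkipWs cs (q + 1) = q + 1 + w1.length := by rw [hispec, htw]
    have hiL : q + 1 + w1.length < cs.length := by omega
    have hdropi : cs.drop (q + 1 + w1.length) = '+' :: (w2 ++ cs.drop q1) := by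
      have h1 := congrArg (List.drop w1.length) ht2
      rw [List.drop_left, List.drop_drop] at h1
      exact h1
    have hiP : cs.getD (q + 1 + w1.length) ' ' = '+' := by
      have h2 := List.drop_eq_getElem_cons hiL
      rw [hdropi] at h2
      have := (List.cons.injEq _ _ _ _).mp h2.symm
      rw [List.getD_eq_getElem cs ' ' hiL]
      exact this.1
    have hdropi1 : cs.drop (q + 1 + w1.length + 1) = w2 ++ cs.drop q1 := by
      have h2 := List.drop_eq_getElem_cons hiL
      rw [hdropi] at h2
      have := (List.cons.injEq _ _ _ _).mp h2.symm
      exact this.2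
    have htw2 : (cs.drop (q + 1 + w1.length + 1)).takeWhile pvWs = w2 := by
      rw [hdropi1, List.takeWhile_append_of_pos (by simpa [List.all_eq_true] using hw2all),
        hdropq1, List.takeWhile_cons_of_neg (by decide)]
      simp
    have hjeq : pvSkipWs cs (pvSkipWs cs (q + 1) + 1) = q1 := by
      rw [hieq, pvSkipWs_spec cs (q + 1 + w1.length + 1), htw2]
      omega
    rw [hjeq, hieq]
    exact ⟨⟨hiL, hiP⟩, hq1n, hcq1⟩

-- a quote character at index i ≥ p makes ['\''] an infix of cs.drop p
lemma pvQuote_infix (cs : List Char) (p i : Nat) (h1 : p ≤ i) (h2 : i < cs.length)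
    (h3 : cs.getD i ' ' = '\'') : ['\''] <:+: cs.drop p := by
  have hlen : i - p < (cs.drop p).length := by simp; omega
  have h4 : (cs.drop p)[i - p]'hlen = cs[p + (i - p)]'(by omega) := List.getElem_drop
  have h5 : cs[p + (i - p)]'(by omega) = '\'' := by
    rw [← List.getD_eq_getElem cs ' ' (by omega : p + (i - p) < cs.length)]
    rw [show p + (i - p) = i by omega]
    exact h3
  have hmem : '\'' ∈ cs.drop p := by
    rw [← h5, ← h4]
    exact List.getElem_mem hlen
  obtain ⟨s, t, hst⟩ := List.append_of_mem hmem
  exact ⟨s, t, by rw [hst]; simp⟩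

-- a quote character at index i is a ['\''] prefix of cs.drop i
lemma pvQuote_prefix (cs : List Char) (i : Nat) (h2 : i < cs.length)
    (h3 : cs.getD i ' ' = '\'') : ['\''] <+: cs.drop i := by
  have hdrop : cs.drop i = cs[i]'h2 :: cs.drop (i + 1) := List.drop_eq_getElem_cons h2
  rw [List.getD_eq_getElem cs ' ' h2] at h3
  rw [hdrop, h3]
  exact ⟨cs.drop (i + 1), rfl⟩

theorem pvLoopA_eq_walk (cs : List Char) (p : Nat) :
    pvLoopA cs (p : Int) = pvWalk cs (pvQN cs p) := by
  rw [pvLoopA]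
  by_cases hp : cs.length < p
  · have hnil : pvQN cs p = [] := pvQN_eq_nil _ _ (fun i h1 h2 _ => by omega)
    rw [hnil]
    simp only [pvFindFrom_gt_len cs _ p hp]
    rfl
  · push Not at hp
    by_cases he : PySem.Chars.findFrom cs ['\''] (p : Int) none = -1
    · have hinf := (PySem.Chars.findFrom_natCast_eq_neg_one_iff cs ['\''] p hp).mp he
      have hnil : pvQN cs p = [] := by
        refine pvQN_eq_nil _ _ (fun i h1 h2 h3 => hinf ?_)
        exact pvQuote_infix cs p i h1 h2 h3
      rw [hnil]
      simp only [he]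
      rfl
    · obtain ⟨hpe, hpre, hminpre⟩ := PySem.Chars.findFrom_natCast_spec cs ['\''] p hp he
      simp only [he, dite_false]
      set E := PySem.Chars.findFrom cs ['\''] (p : Int) none with hE
      set q := E.toNat with hqdef
      have hE0 : (0 : Int) ≤ E := le_trans (by exact_mod_cast Int.natCast_nonneg p) hpe
      have hEq : E = (q : Int) := (Int.toNat_of_nonneg hE0).symm
      obtain ⟨tl, htl⟩ := hpre
      have hqlen : q < cs.length := by
        have := congrArg List.length htl
        simp at this
        omega
      have hcq : cs.getD q ' ' = '\'' := by
        have hdrop : cs.drop q = cs[q]'hqlen :: cs.drop (q + 1) := List.drop_eq_getElem_cons hqlen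
        rw [hdrop] at htl
        rw [List.getD_eq_getElem cs ' ' hqlen]
        exact (List.cons.injEq _ _ _ _).mp htl.symm |>.1
      have hpq : p ≤ q := by omega
      have hminq : ∀ i, p ≤ i → i < q → cs.getD i ' ' ≠ '\'' := by
        intro i h1 h2 h3
        exact hminpre i h1 h2 (pvQuote_prefix cs i (by omega) h3)
      rw [pvQN_cons cs p q hpq hqlen hcq hminq]
      rcases hrest : pvQN cs (q + 1) with _ | ⟨q1, rest⟩
      · -- no further quote: neither the walk nor the loop can continue
        split_ifs with h1 h2
        · exfalso
          have hj1 := pvSkipWs_ge cs (q + 1)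
          have hj2 := pvSkipWs_ge cs (pvSkipWs cs (q + 1) + 1)
          have : pvSkipWs cs (pvSkipWs cs (q + 1) + 1) ∈ pvQN cs (q + 1) :=
            (mem_pvQN _ _ _).mpr ⟨by omega, h2.1, h2.2⟩
          rw [hrest] at this
          simp at this
        · exact hEq
        · exact hEq
      · -- next quote exists: both sides agree on whether the gap chains
        have hq1mem : q1 ∈ pvQN cs (q + 1) := by rw [hrest]; exact List.mem_cons_self
        obtain ⟨hq1ge, hq1n, hcq1⟩ := (mem_pvQN _ _ _).mp hq1mem
        have hminq1 : ∀ i, q + 1 ≤ i → i < q1 → cs.getD i ' ' ≠ '\'' := by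
          intro i h1 h2 h3
          have hmem : i ∈ pvQN cs (q + 1) := (mem_pvQN _ _ _).mpr ⟨h1, by omega, h3⟩
          have hpw := pvQN_pairwise cs (q + 1)
          rw [hrest] at hmem hpw
          have := (List.pairwise_cons.mp hpw).1
          rcases List.mem_cons.mp hmem with rfl | hmem2
          · omega
          · exact absurd (this i hmem2) (by omega)
        have hrest2 : rest = pvQN cs (q1 + 1) := by
          have := pvQN_cons cs (q + 1) q1 hq1ge hq1n hcq1 hminq1
          rw [hrest] at this
          exact ((List.cons.injEq _ _ _ _).mp this).2
        have hmaster := pvCond_master cs q q1 (by omega) hq1n hcq1 hminq1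
        by_cases hB : PySem.Chars.stripChars
            (PySem.List.slice cs (some ((q : Int) + 1)) (some (q1 : Int))) pvWsList = ['+']
        · obtain ⟨⟨hiL, hiP⟩, hjL, hjP⟩ := hmaster.2 hB
          have hjq1 := (hmaster.1 ⟨⟨hiL, hiP⟩, hjL, hjP⟩).2
          rw [hEq]
          rw [if_pos ⟨hiL, hiP⟩, if_pos ⟨hjL, hjP⟩, hjq1]
          have hpush : ((q1 : Int) + 1) = ((q1 + 1 : Nat) : Int) := by push_cast; ring
          rw [hpush, pvLoopA_eq_walk cs (q1 + 1)]
          rw [pvWalk]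
          rw [if_pos hB, hrest2]
        · rw [pvWalk, if_neg hB]
          rw [hEq]
          split_ifs with h1 h2
          · exfalso
            exact hB (hmaster.1 ⟨h1, h2⟩).1
          · rfl
          · rfl
termination_by cs.length + 1 - p
decreasing_by omega

-- ===== VERDICT (by name: the statement is the Claim_ definition above) =====
theorem find_description_end_spec : Claim_equal_find_description_end := by
  intro text start _ hpre
  unfold Spec_find_description_end find_description_end find_description_end_alt
  have h1 : start = ((start.toNat : Nat) : Int) := (Int.toNat_of_nonneg hpre).symm
  rw [h1, pvQuotes_natCast, pvLoopA_eq_walk]
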